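-- pv_equiv track=rewrite | github.com/unitagain/WenShape | backend/app/services/crawler_moegirl_helpers.py | merge_link_lists
-- ===== SOURCE A (Python) =====
-- from typing import Any, Dict, List, Optional
--
-- def merge_link_lists(primary: List[Dict[str, str]], secondary: List[Dict[str, str]], cap: int) -> List[Dict[str, str]]:
--     merged: List[Dict[str, str]] = []
--     seen = set()
--
--     def add(items: List[Dict[str, str]]) -> None:
--         for item in items or []:
--             if len(merged) >= cap:
--                 return
--             if not isinstance(item, dict):
--                 continue
--             url = str(item.get("url") or "").strip()
--             title = str(item.get("title") or "").strip()
--             if not url or not title: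
--                 continue
--             if url in seen:
--                 continue
--             seen.add(url)
--             merged.append({"title": title, "url": url})
--
--     add(primary)
--     add(secondary)
--     return merged
-- ===== SOURCE B (Python) =====
-- def merge_link_lists(primary, secondary, cap):
--     def clean(item):
--         if not isinstance(item, dict):
--             return None
--         url = str(item.get("url") or "").strip()
--         title = str(item.get("title") or "").strip()
--         return (title, url) if url and title else None
--
--     pairs = [p for p in map(clean, (primary or []) + (secondary or [])) if p is not None]
--
--     def dedup(ps):
--         if not ps:
--             return []
--         head = ps[0]
--         return [head] + dedup([p for p in ps[1:] if p[1] != head[1]])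
--
--     return [{"title": t, "url": u} for (t, u) in dedup(pairs)][:max(cap, 0)]
-- ===== Notes on version B (the rewrite author's own statement) =====
-- stated objective: alternative
-- what changed: Replaces the stateful capped single pass (closure mutating a shared merged list and seen set, early-exiting at cap) by staged passes: clean all items to (title,url) pairs, deduplicate with a recursive keep-head-then-filter-out-its-url scheme (no seen set), build the dicts, then slice with [:max(cap,0)].
import Mathlib
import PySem

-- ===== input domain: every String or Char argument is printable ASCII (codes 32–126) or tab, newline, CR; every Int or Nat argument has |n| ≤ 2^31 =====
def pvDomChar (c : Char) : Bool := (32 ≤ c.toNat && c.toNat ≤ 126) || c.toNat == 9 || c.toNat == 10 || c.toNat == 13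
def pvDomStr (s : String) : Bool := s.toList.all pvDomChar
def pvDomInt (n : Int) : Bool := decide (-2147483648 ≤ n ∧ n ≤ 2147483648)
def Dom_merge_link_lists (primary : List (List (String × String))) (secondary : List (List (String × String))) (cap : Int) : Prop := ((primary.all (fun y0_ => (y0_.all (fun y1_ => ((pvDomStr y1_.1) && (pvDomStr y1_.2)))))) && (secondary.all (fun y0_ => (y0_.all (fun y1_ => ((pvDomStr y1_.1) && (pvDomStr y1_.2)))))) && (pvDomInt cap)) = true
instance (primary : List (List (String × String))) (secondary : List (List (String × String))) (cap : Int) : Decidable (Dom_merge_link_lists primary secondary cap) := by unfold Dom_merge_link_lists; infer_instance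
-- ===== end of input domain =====

-- B replaces A's capped stateful pass (a closure mutating a shared list + seen set) by staged
-- passes: clean everything to (title, url) pairs, deduplicate by a recursive
-- keep-head-and-filter-out-its-url scheme (no seen set), build the dicts, then slice
-- with [:max(cap,0)]; objective: alternative (quadratic dedup instead of set-based).

-- ===== PORT A =====

-- str(item.get(k) or "").strip() : a missing key and the empty string both yield "",
-- and strip "" = "", so the 'or ""' collapses into getD "".
def pvField (item : List (String × String)) (k : String) : String :=
  PySem.Str.strip (((PySem.Dict.mk item).get? k).getD "")

-- the closure 'add', threading A's shared state (merged, seen); the 'return' on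
-- len(merged) >= cap becomes returning the state unchanged.
def pvAdd (cap : Int) : List (List (String × String)) →
    (List (List (String × String)) × PySem.Set String) →
    (List (List (String × String)) × PySem.Set String)
  | [], st => st
  | item :: rest, (merged, seen) =>
    if cap ≤ (merged.length : Int) then (merged, seen)
    else
      let url := pvField item "url"
      let title := pvField item "title"
      if url = "" ∨ title = "" then pvAdd cap rest (merged, seen)
      else if PySem.Set.contains seen url then pvAdd cap rest (merged, seen)
      else pvAdd cap rest (merged ++ [[("title", title), ("url", url)]], PySem.Set.add seen url)

def merge_link_lists (primary : List (List (String × String))) (secondary : List (List (String × String))) (cap : Int) : List (List (String × String)) :=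
  (pvAdd cap secondary (pvAdd cap primary ([], PySem.Set.empty))).1

-- ===== PORT B =====

-- Source B's clean: None for an invalid item, (title, url) otherwise
def pvClean (item : List (String × String)) : Option (String × String) :=
  let url := pvField item "url"
  let title := pvField item "title"
  if url ≠ "" ∧ title ≠ "" then some (title, url) else none

-- Source B's recursive dedup: keep the head, filter its url out of the tail, recurse
def pvDedup : List (String × String) → List (String × String)
  | [] => []
  | head :: rest => head :: pvDedup (rest.filter (fun p => p.2 ≠ head.2))
termination_by l => l.length
decreasing_by
  simp only [List.length_cons, List.length_unattach]
  exact Nat.lt_succ_of_le (le_trans (List.length_filter_le _ _) (by simp))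

def merge_link_lists_alt (primary : List (List (String × String))) (secondary : List (List (String × String))) (cap : Int) : List (List (String × String)) :=
  -- pairs = map clean then drop the Nones = filterMap; [:max(cap,0)] = take (max cap 0).toNat
  ((pvDedup ((primary ++ secondary).filterMap pvClean)).map
    (fun tu => [("title", tu.1), ("url", tu.2)])).take (max cap 0).toNat

-- ===== PRECONDITION & SPEC =====
def Spec_merge_link_lists (primary : List (List (String × String))) (secondary : List (List (String × String))) (cap : Int) (out : List (List (String × String))) : Prop := out = merge_link_lists_alt primary secondary cap
instance (primary : List (List (String × String))) (secondary : List (List (String × String))) (cap : Int) (out : List (List (String × String))) : Decidable (Spec_merge_link_lists primary secondary cap out) := by unfold Spec_merge_link_lists; infer_instance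

-- ===== CLAIM (what is proved, stated in full; the proofs are below) =====
def Claim_equal_merge_link_lists : Prop := ∀ (primary : List (List (String × String))) (secondary : List (List (String × String))) (cap : Int), Dom_merge_link_lists primary secondary cap → Spec_merge_link_lists primary secondary cap (merge_link_lists primary secondary cap)

-- ===== LEMMAS AND PROOFS =====

-- unfolding equations for pvDedup (its equation lemmas, freed from the attach plumbing)
lemma pvDedup_nil : pvDedup [] = [] := by rw [pvDedup]

lemma pvDedup_cons (head : String × String) (rest : List (String × String)) :
    pvDedup (head :: rest) = head :: pvDedup (rest.filter (fun p => p.2 ≠ head.2)) := by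
  rw [pvDedup]

-- membership in an augmented seen set
lemma pvContains_add (s : PySem.Set String) (x y : String) :
    PySem.Set.contains (PySem.Set.add s x) y = (PySem.Set.contains s y || y == x) := by
  simp only [PySem.Set.add, PySem.Set.contains]
  split
  · simp_all [List.contains_eq_mem]
  · simp_all [List.contains_eq_mem]
    tauto

-- once full, A's loop changes nothing
lemma pvAdd_full (cap : Int) (items : List (List (String × String))) (merged : List (List (String × String))) (seen : PySem.Set String) (h : cap ≤ (merged.length : Int)) :
    pvAdd cap items (merged, seen) = (merged, seen) := by
  cases items with
  | nil => rfl
  | cons item rest => simp [pvAdd, h]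

-- A's loop splits over concatenation
lemma pvAdd_append (cap : Int) (xs ys : List (List (String × String))) (st : List (List (String × String)) × PySem.Set String) :
    pvAdd cap (xs ++ ys) st = pvAdd cap ys (pvAdd cap xs st) := by
  induction xs generalizing st with
  | nil => rfl
  | cons item rest ih =>
    obtain ⟨merged, seen⟩ := st
    by_cases h : cap ≤ (merged.length : Int)
    · rw [List.cons_append]
      simp only [pvAdd, if_pos h]
      rw [pvAdd_full cap ys merged seen h]
    · rw [List.cons_append]
      simp only [pvAdd, if_neg h]
      split_ifs with h1 h2 <;> exact ih _

-- main invariant: A's stateful capped loop computes merged ++ the cap-remainder prefix of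
-- B's dedup applied to the cleaned items not yet seen
lemma pvAdd_eq (cap : Int) (items : List (List (String × String))) (merged : List (List (String × String))) (seen : PySem.Set String) :
    (pvAdd cap items (merged, seen)).1 =
      merged ++ ((pvDedup ((items.filterMap pvClean).filter
          (fun p => !(PySem.Set.contains seen p.2)))).map
        (fun tu => [("title", tu.1), ("url", tu.2)])).take ((cap - merged.length).toNat) := by
  induction items generalizing merged seen with
  | nil => simp [pvAdd, pvDedup_nil]

  | cons item rest ih =>
    by_cases hfull : cap ≤ ((merged).length : Int)
    · rw [pvAdd_full cap _ _ _ hfull]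
      have : (cap - merged.length).toNat = 0 := by omega
      simp [this]
    · simp only [pvAdd, if_neg hfull, List.filterMap_cons]
      by_cases hv : pvField item "url" = "" ∨ pvField item "title" = ""
      · rw [if_pos hv]
        have hc : pvClean item = none := by
          unfold pvClean; rw [if_neg (by tauto)]
        rw [hc]
        exact ih merged seen
      · rw [if_neg hv]
        push Not at hv
        have hc : pvClean item = some (pvField item "title", pvField item "url") := by
          unfold pvClean; rw [if_pos ⟨hv.1, hv.2⟩]
        rw [hc]
        by_cases hseen : PySem.Set.contains seen (pvField item "url") = true
        · rw [if_pos hseen]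
          rw [List.filter_cons_of_neg (by simp only [hseen]; simp)]
          exact ih merged seen
        · rw [if_neg hseen]
          simp only [Bool.not_eq_true] at hseen
          rw [List.filter_cons_of_pos (by simp only [hseen]; simp)]
          rw [ih (merged ++ [[("title", pvField item "title"), ("url", pvField item "url")]]) (PySem.Set.add seen (pvField item "url"))]
          have hfilt : (rest.filterMap pvClean).filter
                (fun p => !(PySem.Set.contains (PySem.Set.add seen (pvField item "url")) p.2))
              = ((rest.filterMap pvClean).filter
                  (fun p => !(PySem.Set.contains seen p.2))).filter
                (fun p => p.2 ≠ pvField item "url") := by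
            rw [List.filter_filter]
            apply List.filter_congr
            intro p _
            rw [pvContains_add]
            by_cases hq : p.2 = pvField item "url" <;>
              cases hc : PySem.Set.contains seen p.2 <;> simp_all
          have hn : (cap - merged.length).toNat = ((cap - (merged.length + 1)).toNat) + 1 := by omega
          rw [hfilt, hn, pvDedup_cons]
          simp only [List.map_cons, List.take_succ_cons, List.length_append,
            List.length_cons, List.length_nil, List.append_assoc, List.cons_append,
            List.nil_append]
          norm_num

-- ===== VERDICT (by name: the statement is the Claim_ definition above) =====
theorem merge_link_lists_spec : Claim_equal_merge_link_lists := by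
  intro primary secondary cap _
  unfold Spec_merge_link_lists merge_link_lists merge_link_lists_alt
  rw [← pvAdd_append, pvAdd_eq]
  have hfilt : (((primary ++ secondary).filterMap pvClean).filter
      (fun p => !(PySem.Set.contains PySem.Set.empty p.2)))
      = (primary ++ secondary).filterMap pvClean := by
    apply List.filter_eq_self.mpr
    intro a _
    simp [PySem.Set.contains, PySem.Set.empty]
  rw [hfilt]
  simp only [List.length_nil, Nat.cast_zero, Int.sub_zero, List.nil_append]
  congr 1
  omega
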